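-- pv_equiv track=rewrite | github.com/tangentstorm/turyn | scripts/analyze_middles.py | is_turyn
-- ===== SOURCE A (Python) =====
-- def aperiodic(seq, s):
--     return sum(seq[i] * seq[i + s] for i in range(len(seq) - s))
--
-- def is_turyn(X, Y, Z, W):
--     n = len(X)
--     for s in range(1, n):
--         nx = aperiodic(X, s)
--         ny = aperiodic(Y, s)
--         nz = aperiodic(Z, s)
--         nw = aperiodic(W, s) if s < n - 1 else 0
--         if nx + ny + 2 * nz + 2 * nw != 0:
--             return False
--     return True
-- ===== SOURCE B (Python) =====
-- def autocorrs(seq):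
--     # returns [c_1, ..., c_{len(seq)-1}] with c_s = sum(seq[i]*seq[i+s]):
--     # walking the suffixes back to front, the autocorrelations of seq[k:]
--     # are x*seq[k+1:] (elementwise) plus those of seq[k+1:] (padded with 0).
--     c = []
--     for k in range(len(seq) - 1, -1, -1):
--         c.append(0)
--         x = seq[k]
--         c = [x * t + cj for t, cj in zip(seq[k + 1:], c)]
--     return c
--
-- def is_turyn(X, Y, Z, W):
--     n = len(X)
--     cx, cy, cz, cw = autocorrs(X), autocorrs(Y), autocorrs(Z), autocorrs(W)
--     def at(c, s):
--         return c[s - 1] if s - 1 < len(c) else 0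
--     return all(
--         at(cx, s) + at(cy, s) + 2 * at(cz, s)
--         + (2 * at(cw, s) if s < n - 1 else 0) == 0
--         for s in range(1, n)
--     )
-- ===== Notes on version B (the rewrite author's own statement) =====
-- stated objective: alternative
-- what changed: Instead of recomputing each shift's autocorrelation by an index-sum per shift, B builds the full list of aperiodic autocorrelations of each sequence in one back-to-front pass over suffixes (c(x::t)[s] = x*t[s-1] + c(t)[s], via zip) and then checks all shifts with all(); note A early-exits at the first nonzero shift while B computes all correlations first.
import Mathlib
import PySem

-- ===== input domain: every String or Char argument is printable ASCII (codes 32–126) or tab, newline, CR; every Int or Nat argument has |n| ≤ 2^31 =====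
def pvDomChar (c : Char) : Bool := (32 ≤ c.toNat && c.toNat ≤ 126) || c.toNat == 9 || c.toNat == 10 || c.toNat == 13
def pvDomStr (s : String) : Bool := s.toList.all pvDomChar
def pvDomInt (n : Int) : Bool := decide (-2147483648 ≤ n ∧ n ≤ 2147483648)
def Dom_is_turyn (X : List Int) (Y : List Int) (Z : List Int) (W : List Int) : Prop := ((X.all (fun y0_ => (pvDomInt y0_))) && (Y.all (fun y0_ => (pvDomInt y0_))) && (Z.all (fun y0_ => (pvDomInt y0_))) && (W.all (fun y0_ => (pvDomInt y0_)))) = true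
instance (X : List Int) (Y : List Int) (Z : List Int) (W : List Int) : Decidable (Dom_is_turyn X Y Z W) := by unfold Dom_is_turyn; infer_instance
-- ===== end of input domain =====

-- B replaces A's per-shift index summation by a structural recursion on the sequence
-- that produces all aperiodic autocorrelations at once (alternative decomposition, same cost).

-- ===== PORT A =====
-- indices i and i+s are always in range when aperiodic is reached (0 ≤ i < len-s), so pyGetD is exact here
def aperiodicA (seq : List Int) (s : Int) : Int :=
  (PySem.List.pyRange 0 ((seq.length : Int) - s) 1).foldl
    (fun acc i => acc + PySem.List.pyGetD seq i 0 * PySem.List.pyGetD seq (i + s) 0) 0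

def turynLoopA (X Y Z W : List Int) (n : Int) : List Int → Bool
  | [] => true
  | s :: rest =>
      let nx := aperiodicA X s
      let ny := aperiodicA Y s
      let nz := aperiodicA Z s
      let nw := if s < n - 1 then aperiodicA W s else 0
      if nx + ny + 2 * nz + 2 * nw ≠ 0 then false
      else turynLoopA X Y Z W n rest

def is_turyn (X : List Int) (Y : List Int) (Z : List Int) (W : List Int) : Bool :=
  turynLoopA X Y Z W (X.length : Int) (PySem.List.pyRange 1 (X.length : Int) 1)

-- ===== PORT B =====
-- the loop body of autocorrs: c.append(0); x = seq[k]; zip/comprehension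
-- (index k is always in range when the body runs, so pyGetD is exact here)
def acStep (seq : List Int) (c : List Int) (k : Int) : List Int :=
  let c := c ++ [0]
  let x := PySem.List.pyGetD seq k 0
  ((PySem.List.slice seq (some (k + 1)) none).zip c).map (fun p => x * p.1 + p.2)

def autocorrsB (seq : List Int) : List Int :=
  (PySem.List.pyRange ((seq.length : Int) - 1) (-1) (-1)).foldl (acStep seq) []

def atB (c : List Int) (s : Int) : Int :=
  if s - 1 < (c.length : Int) then PySem.List.pyGetD c (s - 1) 0 else 0

def is_turyn_alt (X : List Int) (Y : List Int) (Z : List Int) (W : List Int) : Bool :=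
  let n : Int := (X.length : Int)
  let cx := autocorrsB X
  let cy := autocorrsB Y
  let cz := autocorrsB Z
  let cw := autocorrsB W
  (PySem.List.pyRange 1 n 1).all (fun s =>
    atB cx s + atB cy s + 2 * atB cz s
      + (if s < n - 1 then 2 * atB cw s else 0) == 0)

-- ===== PRECONDITION & SPEC =====
def Spec_is_turyn (X : List Int) (Y : List Int) (Z : List Int) (W : List Int) (out : Bool) : Prop := out = is_turyn_alt X Y Z W
instance (X : List Int) (Y : List Int) (Z : List Int) (W : List Int) (out : Bool) : Decidable (Spec_is_turyn X Y Z W out) := by unfold Spec_is_turyn; infer_instance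

-- ===== CLAIM (what is proved, stated in full; the proofs are below) =====
def Claim_equal_is_turyn : Prop := ∀ (X : List Int) (Y : List Int) (Z : List Int) (W : List Int), Dom_is_turyn X Y Z W → Spec_is_turyn X Y Z W (is_turyn X Y Z W)

-- ===== LEMMAS AND PROOFS =====

-- mathematical reference: the aperiodic autocorrelation at shift k
def ap (seq : List Int) (k : Nat) : Int :=
  ((List.range (seq.length - k)).map (fun i => seq.getD i 0 * seq.getD (i + k) 0)).sum

theorem aperiodicA_eq_ap (seq : List Int) (s : Int) (hs : 0 ≤ s) :
    aperiodicA seq s = ap seq s.toNat := by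
  obtain ⟨m, rfl⟩ : ∃ m : Nat, s = (m : Int) := ⟨s.toNat, (Int.toNat_of_nonneg hs).symm⟩
  unfold aperiodicA ap
  rw [PySem.List.foldl_add, PySem.List.pyRange_one, List.map_map, zero_add]
  have h1 : ((seq.length : Int) - (m : Int) - 0).toNat = seq.length - m := by omega
  rw [h1, Int.toNat_natCast]
  refine congrArg List.sum (List.map_congr_left ?_)
  intro k _
  have h2 : (0 : Int) + (k : Int) = ((k : Nat) : Int) := by omega
  have h3 : (k : Int) + (m : Int) = (((k + m : Nat)) : Int) := by omega
  simp only [Function.comp, h2, h3, PySem.List.pyGetD_natCast]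

theorem ap_cons (x : Int) (tail : List Int) (k : Nat) (hk : 1 ≤ k) :
    ap (x :: tail) k = x * tail.getD (k - 1) 0 + ap tail k := by
  unfold ap
  by_cases hk2 : k ≤ tail.length
  · have h1 : (x :: tail).length - k = (tail.length - k) + 1 := by
      simp [List.length_cons]; omega
    rw [h1, List.range_succ_eq_map, List.map_cons, List.map_map, List.sum_cons]
    have h0 : (x :: tail).getD 0 0 = x := rfl
    have hkth : (x :: tail).getD (0 + k) 0 = tail.getD (k - 1) 0 := by
      obtain ⟨k', rfl⟩ : ∃ k', k = k' + 1 := ⟨k - 1, by omega⟩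
      simp
    rw [h0, hkth]
    congr 1
    refine congrArg List.sum (List.map_congr_left ?_)
    intro i _
    simp only [Function.comp, Nat.succ_eq_add_one]
    have : i + 1 + k = (i + k) + 1 := by omega
    rw [this]
    rfl
  · have h1 : (x :: tail).length - k = 0 := by simp [List.length_cons]; omega
    have h2 : tail.length - k = 0 := by omega
    rw [h1, h2]
    have h3 : tail.getD (k - 1) 0 = 0 := List.getD_eq_default _ _ (by omega)
    simp only [List.range_zero, List.map_nil, List.sum_nil]
    rw [h3]; ring

-- proof-side characterisation of autocorrs: structural recursion on the sequence
def corr : List Int → List Int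
  | [] => []
  | x :: t => (t.zip (corr t ++ [0])).map (fun p => x * p.1 + p.2)

theorem corr_length (seq : List Int) : (corr seq).length = seq.length - 1 := by
  induction seq with
  | nil => rfl
  | cons x t ih => simp [corr, ih]; omega

theorem acStep_corr (seq : List Int) (k : Nat) (hk : k < seq.length) :
    acStep seq (corr (seq.drop (k + 1))) (k : Int) = corr (seq.drop k) := by
  unfold acStep
  rw [PySem.List.slice_from (xs := seq) (a := (k : Int) + 1) (by omega)]
  have h1 : ((k : Int) + 1).toNat = k + 1 := by omega
  rw [h1]
  have h2 : PySem.List.pyGetD seq (k : Int) 0 = seq[k] := by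
    rw [PySem.List.pyGetD_natCast]; exact List.getD_eq_getElem _ _ hk
  rw [h2, List.drop_eq_getElem_cons hk]
  rfl

theorem fold_corr (seq : List Int) (m : Nat) (hm : m ≤ seq.length) :
    (PySem.List.pyRange ((m : Int) - 1) (-1) (-1)).foldl (acStep seq) (corr (seq.drop m))
      = corr seq := by
  induction m with
  | zero =>
      rw [PySem.List.pyRange_neg_one_eq_nil (by omega)]
      simp
  | succ m ih =>
      have h1 : ((m + 1 : Nat) : Int) - 1 = (m : Int) := by push_cast; ring
      rw [h1, PySem.List.pyRange_neg_one_cons (by omega), List.foldl_cons,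
        acStep_corr seq m (by omega)]
      exact ih (by omega)

theorem autocorrsB_eq_corr (seq : List Int) : autocorrsB seq = corr seq := by
  unfold autocorrsB
  have h := fold_corr seq seq.length le_rfl
  simpa [corr] using h

theorem corr_getD (seq : List Int) (k : Nat) (hk : 1 ≤ k) :
    (corr seq).getD (k - 1) 0 = ap seq k := by
  induction seq with
  | nil => simp [corr, ap]
  | cons x t ih =>
      have hlc : (corr t).length = t.length - 1 := corr_length t
      by_cases hi : k - 1 < t.length
      · have hzl : ((t.zip (corr t ++ [0])).map (fun p => x * p.1 + p.2)).length = t.length := by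
          simp [hlc]; omega
        have hilt : k - 1 < ((t.zip (corr t ++ [0])).map (fun p => x * p.1 + p.2)).length := by
          omega
        rw [show corr (x :: t) = (t.zip (corr t ++ [0])).map (fun p => x * p.1 + p.2) from rfl,
          List.getD_eq_getElem _ _ hilt]
        simp only [List.getElem_map, List.getElem_zip]
        have h2 : (corr t ++ [0])[k - 1]'(by simp [hlc]; omega) = ap t k := by
          by_cases hlt : k - 1 < (corr t).length
          · rw [List.getElem_append_left hlt, ← List.getD_eq_getElem _ (0 : Int) hlt]
            exact ih
          · have hkk : k = t.length := by omega
            have hgz : (corr t ++ [0])[k - 1]'(by simp [hlc]; omega) = 0 := by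
              have he : k - 1 = (corr t).length + 0 := by omega
              simp [he, List.getElem_append_right]
            rw [hgz]
            unfold ap
            rw [show t.length - k = 0 from by omega]
            rfl
        rw [h2, ap_cons x t k hk]
        congr 1
        rw [List.getD_eq_getElem _ _ hi]
      · have hL : (corr (x :: t)).getD (k - 1) 0 = 0 := by
          refine List.getD_eq_default _ _ ?_
          rw [corr_length]
          simp; omega
        have hR : ap (x :: t) k = 0 := by
          unfold ap
          rw [show (x :: t).length - k = 0 from by simp; omega]
          rfl
        rw [hL, hR]

theorem autocorrsB_getD (seq : List Int) (k : Nat) (hk : 1 ≤ k) :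
    (autocorrsB seq).getD (k - 1) 0 = ap seq k := by
  rw [autocorrsB_eq_corr]; exact corr_getD seq k hk

theorem atB_eq (seq : List Int) (s : Int) (hs : 1 ≤ s) :
    atB (autocorrsB seq) s = aperiodicA seq s := by
  obtain ⟨m, rfl⟩ : ∃ m : Nat, s = (m : Int) := ⟨s.toNat, (Int.toNat_of_nonneg (by omega)).symm⟩
  have hm : 1 ≤ m := by exact_mod_cast hs
  rw [aperiodicA_eq_ap seq _ (by positivity), Int.toNat_natCast]
  unfold atB
  have hcast : ((m : Int) - 1) = ((m - 1 : Nat) : Int) := by omega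
  rw [hcast]
  split_ifs with h
  · rw [PySem.List.pyGetD_natCast]
    exact autocorrsB_getD seq m hm
  · rw [← autocorrsB_getD seq m hm]
    exact (List.getD_eq_default _ _ (by exact_mod_cast not_lt.mp h)).symm

theorem loop_eq (X Y Z W : List Int) (n : Int) (ss : List Int)
    (h : ∀ s ∈ ss, 1 ≤ s) :
    turynLoopA X Y Z W n ss =
      ss.all (fun s =>
        atB (autocorrsB X) s + atB (autocorrsB Y) s + 2 * atB (autocorrsB Z) s
          + (if s < n - 1 then 2 * atB (autocorrsB W) s else 0) == 0) := by
  induction ss with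
  | nil => rfl
  | cons s rest ih =>
      have hs : 1 ≤ s := h s (List.mem_cons_self)
      have hrest : ∀ t ∈ rest, 1 ≤ t := fun t ht => h t (List.mem_cons_of_mem _ ht)
      simp only [turynLoopA, List.all_cons]
      rw [atB_eq X s hs, atB_eq Y s hs, atB_eq Z s hs, atB_eq W s hs]
      have hval : aperiodicA X s + aperiodicA Y s + 2 * aperiodicA Z s
          + 2 * (if s < n - 1 then aperiodicA W s else 0)
          = aperiodicA X s + aperiodicA Y s + 2 * aperiodicA Z s
          + (if s < n - 1 then 2 * aperiodicA W s else 0) := by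
        split_ifs <;> ring
      rw [hval]
      by_cases hz : aperiodicA X s + aperiodicA Y s + 2 * aperiodicA Z s
          + (if s < n - 1 then 2 * aperiodicA W s else 0) = 0
      · simp [hz, ih hrest]
      · simp [hz]

-- ===== VERDICT (by name: the statement is the Claim_ definition above) =====
theorem is_turyn_spec : Claim_equal_is_turyn := by
  intro X Y Z W _
  unfold Spec_is_turyn is_turyn is_turyn_alt
  exact loop_eq X Y Z W _ _ (fun s hs => (PySem.List.mem_pyRange_one.mp hs).1)
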